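-- pv_equiv track=rewrite | github.com/obinhood/prague_real_estate_intelligence | src/utils/process_csv.py | _price_tier
-- ===== SOURCE A (Python) =====
-- from typing import Dict, Optional, Tuple
--
-- _SALE_PRICE_TIERS = [
--     (3_000_000,  "budget"),   # < 3 M
--     (6_000_000,  "mid"),      # 3–6 M
--     (12_000_000, "premium"),  # 6–12 M
--     (None,       "luxury"),   # > 12 M
-- ]
--
-- _RENT_PRICE_TIERS = [
--     (15_000, "budget"),   # < 15 k/mo
--     (30_000, "mid"),      # 15–30 k
--     (60_000, "premium"),  # 30–60 k
--     (None,   "luxury"),   # > 60 k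
-- ]
--
-- def _price_tier(price_czk, property_search_type) -> Optional[str]:
--     """Categorical price bucket. Thresholds differ for sale vs rent."""
--     try:
--         price = float(price_czk)
--     except (TypeError, ValueError):
--         return None
--     pst = str(property_search_type or "").lower()
--     tiers = _RENT_PRICE_TIERS if ("rent" in pst or "pronajem" in pst or "najem" in pst) else _SALE_PRICE_TIERS
--     for limit, label in tiers:
--         if limit is None or price < limit:
--             return label
--     return tiers[-1][1]
-- ===== SOURCE B (Python) =====
-- _TIER_LABELS = ["budget", "mid", "premium", "luxury"]
-- _SALE_LIMITS = [3_000_000, 6_000_000, 12_000_000]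
-- _RENT_LIMITS = [15_000, 30_000, 60_000]
--
-- def _price_tier(price_czk, property_search_type):
--     """Categorical price bucket via binary search over the sorted thresholds."""
--     try:
--         price = float(price_czk)
--     except (TypeError, ValueError):
--         return None
--     pst = str(property_search_type or "").lower()
--     rent = "rent" in pst or "pronajem" in pst or "najem" in pst
--     limits = _RENT_LIMITS if rent else _SALE_LIMITS
--     lo, hi = 0, len(limits)
--     while lo < hi:
--         mid = (lo + hi) // 2
--         if price < limits[mid]:
--             hi = mid
--         else:
--             lo = mid + 1
--     return _TIER_LABELS[lo]
-- ===== Notes on version B (the rewrite author's own statement) =====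
-- stated objective: idiomatic
-- what changed: Replaced the sequential scan over (limit,label) pairs with first-match early return by a bisect_right-style binary search over a sorted threshold list that computes an index into a parallel label list.
import Mathlib
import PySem

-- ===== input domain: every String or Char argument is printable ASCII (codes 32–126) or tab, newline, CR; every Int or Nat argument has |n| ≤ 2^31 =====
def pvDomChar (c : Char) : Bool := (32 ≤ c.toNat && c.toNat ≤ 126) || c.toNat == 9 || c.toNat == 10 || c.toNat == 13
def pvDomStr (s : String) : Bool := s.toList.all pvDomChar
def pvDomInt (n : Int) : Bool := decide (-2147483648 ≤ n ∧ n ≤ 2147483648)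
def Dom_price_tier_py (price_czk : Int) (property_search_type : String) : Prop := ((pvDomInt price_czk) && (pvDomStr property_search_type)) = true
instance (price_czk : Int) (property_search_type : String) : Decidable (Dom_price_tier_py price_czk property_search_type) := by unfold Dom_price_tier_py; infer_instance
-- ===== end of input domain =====

-- B replaces A's sequential first-limit scan over (limit, label) pairs by a hand-written
-- binary search over a sorted threshold list indexing a parallel label list (idiomatic bisect_right).


-- ===== PORT A =====
def pvTiersSale : List (Option Int × String) :=
  [(some 3000000, "budget"), (some 6000000, "mid"), (some 12000000, "premium"), (none, "luxury")]
def pvTiersRent : List (Option Int × String) :=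
  [(some 15000, "budget"), (some 30000, "mid"), (some 60000, "premium"), (none, "luxury")]

-- the `for limit, label in tiers` loop with its early returns
def pvTierLoop (price : Int) : List (Option Int × String) → Option String
  | [] => none
  | (limit, label) :: rest =>
    match limit with
    | none => some label
    | some l => if price < l then some label else pvTierLoop price rest

def price_tier_py (price_czk : Int) (property_search_type : String) : Option String :=
  -- float(price_czk) on an int never raises, and is exact on |n| ≤ 2^31, so `price` stays an Int
  let price := price_czk
  -- `str(property_search_type or "")` is the identity on strings ("" falls back to "")
  let pst := PySem.Str.lower property_search_type
  let tiers :=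
    if PySem.Str.isIn "rent" pst || PySem.Str.isIn "pronajem" pst || PySem.Str.isIn "najem" pst
    then pvTiersRent else pvTiersSale
  match pvTierLoop price tiers with
  | some label => some label
  | none => (PySem.List.pyGet? tiers (-1)).map Prod.snd   -- the post-loop `return tiers[-1][1]`

-- ===== PORT B =====
def pvTierLabels : List String := ["budget", "mid", "premium", "luxury"]
def pvSaleLimits : List Int := [3000000, 6000000, 12000000]
def pvRentLimits : List Int := [15000, 30000, 60000]

-- Source B's `while lo < hi` binary search (limits[mid] as total pyGetD: mid is always in range)
def pvBsearch (price : Int) (limits : List Int) (lo hi : Int) : Int :=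
  if h : lo < hi then
    let mid := PySem.Int.floordiv (lo + hi) 2
    if price < PySem.List.pyGetD limits mid 0 then
      pvBsearch price limits lo mid
    else
      pvBsearch price limits (mid + 1) hi
  else lo
termination_by (hi - lo).toNat
decreasing_by
  · have hlt : PySem.Int.floordiv (lo + hi) 2 < hi := by
      rw [PySem.Int.floordiv_lt_iff_lt_mul (by omega)]; omega
    omega
  · have hb := PySem.Int.floordiv_two_mid_bounds (le_of_lt h) (lo := lo) (hi := hi)
    omega

def price_tier_py_alt (price_czk : Int) (property_search_type : String) : Option String :=
  let price := price_czk
  let pst := PySem.Str.lower property_search_type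
  let rent := PySem.Str.isIn "rent" pst || PySem.Str.isIn "pronajem" pst || PySem.Str.isIn "najem" pst
  let limits := if rent then pvRentLimits else pvSaleLimits
  let lo := pvBsearch price limits 0 (limits.length : Int)
  PySem.List.pyGet? pvTierLabels lo

-- ===== PRECONDITION & SPEC =====
def Spec_price_tier_py (price_czk : Int) (property_search_type : String) (out : Option String) : Prop := out = price_tier_py_alt price_czk property_search_type
instance (price_czk : Int) (property_search_type : String) (out : Option String) : Decidable (Spec_price_tier_py price_czk property_search_type out) := by unfold Spec_price_tier_py; infer_instance

-- ===== CLAIM (what is proved, stated in full; the proofs are below) =====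
def Claim_equal_price_tier_py : Prop := ∀ (price_czk : Int) (property_search_type : String), Dom_price_tier_py price_czk property_search_type → Spec_price_tier_py price_czk property_search_type (price_tier_py price_czk property_search_type)

-- ===== LEMMAS AND PROOFS =====
lemma pvLoop_sale (p : Int) :
    pvTierLoop p pvTiersSale =
      some (if p < 3000000 then "budget" else if p < 6000000 then "mid"
            else if p < 12000000 then "premium" else "luxury") := by
  simp only [pvTiersSale, pvTierLoop]
  split_ifs <;> rfl

lemma pvLoop_rent (p : Int) :
    pvTierLoop p pvTiersRent =
      some (if p < 15000 then "budget" else if p < 30000 then "mid"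
            else if p < 60000 then "premium" else "luxury") := by
  simp only [pvTiersRent, pvTierLoop]
  split_ifs <;> rfl

lemma pvBsearch_stop (p : Int) (l : List Int) (lo : Int) : pvBsearch p l lo lo = lo := by
  rw [pvBsearch.eq_def]; simp

lemma pvBsearch_three (p a b c : Int) :
    pvBsearch p [a, b, c] 0 3 =
      if p < b then (if p < a then 0 else 1) else (if p < c then 2 else 3) := by
  have e01 : pvBsearch p [a, b, c] 0 1 = if p < a then 0 else 1 := by
    rw [pvBsearch.eq_def]
    norm_num [show PySem.Int.floordiv (0 + 1) 2 = 0 from by decide,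
      PySem.List.pyGetD, PySem.List.pyGet?, PySem.List.pyIdx?, pvBsearch_stop]
  have e23 : pvBsearch p [a, b, c] 2 3 = if p < c then 2 else 3 := by
    rw [pvBsearch.eq_def]
    norm_num [show PySem.Int.floordiv (2 + 3) 2 = 2 from by decide,
      show ((2 : Int).toNat) = 2 from rfl, List.getElem_cons_succ, List.getElem_cons_zero,
      PySem.List.pyGetD, PySem.List.pyGet?, PySem.List.pyIdx?, pvBsearch_stop]
  rw [pvBsearch.eq_def]
  norm_num [show PySem.Int.floordiv (0 + 3) 2 = 1 from by decide,
    PySem.List.pyGetD, PySem.List.pyGet?, PySem.List.pyIdx?, e01, e23]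

-- ===== VERDICT (by name: the statement is the Claim_ definition above) =====
theorem price_tier_py_spec : Claim_equal_price_tier_py := by
  intro p s _
  unfold Spec_price_tier_py price_tier_py price_tier_py_alt
  by_cases hr : (PySem.Str.isIn "rent" (PySem.Str.lower s)
      || PySem.Str.isIn "pronajem" (PySem.Str.lower s)
      || PySem.Str.isIn "najem" (PySem.Str.lower s)) = true
  · simp only [hr, if_true, pvRentLimits, pvLoop_rent]
    norm_num [pvBsearch_three]
    split_ifs <;> first | omega | rfl
  · simp only [Bool.not_eq_true] at hr
    simp only [hr, Bool.false_eq_true, if_false, pvSaleLimits, pvLoop_sale]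
    norm_num [pvBsearch_three]
    split_ifs <;> first | omega | rfl
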